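-- pv_equiv track=rewrite | github.com/Alzomra/Praccforces | cogs/problemset.py | cleaned_args
-- ===== SOURCE A (Python) =====
-- def cleaned_args(args):
--     if (args == ''):
--         return [''], 0, False
--     args = args.split('-')
--     diff = 0
--     wild = False
--     diffb = False
--     new_args = []
--     for arg in args:
--         try:
--             arg = int(arg)
--         except:
--             if arg.strip() == "*":
--                 wild = True
--             else:
--                 new_args.append(arg.lower().strip())
--         else:
--             if not diffb:
--                 diff = arg
--                 diffb = True
--     return new_args, diff, wild
-- ===== SOURCE B (Python) =====
-- def _try_int(s):
--     try:
--         return int(s)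
--     except ValueError:
--         return None
--
--
-- def cleaned_args(args):
--     tokens = args.split('-')
--     wild = any(t.strip() == '*' for t in tokens)
--     diff = next((v for v in map(_try_int, tokens) if v is not None), 0)
--     new_args = [t.lower().strip() for t in tokens
--                 if _try_int(t) is None and t.strip() != '*']
--     return new_args, diff, wild
-- ===== Notes on version B (the rewrite author's own statement) =====
-- stated objective: alternative
-- what changed: A's single stateful loop threading four accumulators (new_args, diff, wild, diffb) is replaced by one independent pass per output component — wild via any() over stripped tokens, diff as the first token parsed by a shared _try_int helper, new_args as one comprehension over the remaining tokens — and the redundant empty-input guard is dropped because the general path already produces the same triple there.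
import Mathlib
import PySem

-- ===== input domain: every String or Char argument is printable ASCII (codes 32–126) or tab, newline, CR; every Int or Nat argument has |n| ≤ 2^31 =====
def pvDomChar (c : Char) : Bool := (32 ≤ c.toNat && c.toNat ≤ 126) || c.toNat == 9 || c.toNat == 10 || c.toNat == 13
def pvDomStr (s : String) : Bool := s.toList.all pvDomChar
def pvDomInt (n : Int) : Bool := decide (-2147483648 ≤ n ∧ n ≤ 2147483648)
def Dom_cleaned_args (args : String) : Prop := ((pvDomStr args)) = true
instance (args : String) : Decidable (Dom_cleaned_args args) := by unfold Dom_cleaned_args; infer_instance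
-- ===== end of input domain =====

-- B replaces A's single stateful loop by one independent pass per output component
-- (any / first-parse / comprehension); same return value, alternative decomposition.

-- ===== PORT A =====
-- A's loop state: (new_args, diff, wild, diffb)
def cleaned_args (args : String) : List String × Int × Bool :=
  if args = "" then ([""], 0, false)
  else
    -- args = args.split('-')  (sep is the nonempty literal "-")
    let toks := (PySem.Chars.splitOn args.toList ['-']).map String.ofList
    let st := toks.foldl (fun (st : List String × Int × Bool × Bool) arg =>
      match PySem.Int.ofStr? arg with        -- try: arg = int(arg)
      | none =>
        if PySem.Str.strip arg = "*" then (st.1, st.2.1, true, st.2.2.2)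
        else (st.1 ++ [PySem.Str.strip (PySem.Str.lower arg)], st.2.1, st.2.2.1, st.2.2.2)
      | some n =>
        if st.2.2.2 = false then (st.1, n, st.2.2.1, true) else st)
      ([], 0, false, false)
    (st.1, st.2.1, st.2.2.1)

-- ===== PORT B =====
-- _try_int(s)
def pvTryInt (s : String) : Option Int := PySem.Int.ofStr? s

def cleaned_args_alt (args : String) : List String × Int × Bool :=
  let tokens := (PySem.Chars.splitOn args.toList ['-']).map String.ofList
  let wild := tokens.any (fun t => PySem.Str.strip t == "*")
  let diff := ((tokens.map pvTryInt).findSome? id).getD 0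
  let newArgs := (tokens.filter (fun t => (pvTryInt t).isNone && !(PySem.Str.strip t == "*"))).map
      (fun t => PySem.Str.strip (PySem.Str.lower t))
  (newArgs, diff, wild)

-- ===== PRECONDITION & SPEC =====
def Spec_cleaned_args (args : String) (out : List String × Int × Bool) : Prop := out = cleaned_args_alt args
instance (args : String) (out : List String × Int × Bool) : Decidable (Spec_cleaned_args args out) := by unfold Spec_cleaned_args; infer_instance

-- ===== CLAIM (what is proved, stated in full; the proofs are below) =====
def Claim_equal_cleaned_args : Prop := ∀ (args : String), Dom_cleaned_args args → Spec_cleaned_args args (cleaned_args args)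

-- ===== LEMMAS AND PROOFS =====

theorem dropWhile_congr' {α : Type} (p q : α → Bool) (l : List α) (h : ∀ c ∈ l, p c = q c) :
    l.dropWhile p = l.dropWhile q := by
  induction l with
  | nil => rfl
  | cons a t ih =>
    simp only [List.dropWhile_cons, h a (by simp)]
    split
    · exact ih fun c hc => h c (by simp [hc])
    · rfl

theorem char_eq_iff_toNat (c d : Char) : (c = d) ↔ c.toNat = d.toNat := eq_iff_eq_of_cmp_eq_cmp rfl

-- on the domain's characters, str.strip's whitespace and int()'s whitespace coincide
theorem isspace_eq_isIntSpace (c : Char) (h : pvDomChar c = true) :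
    PySem.Chars.isspace c = PySem.Int.isIntSpace c := by
  simp only [pvDomChar, Bool.or_eq_true, Bool.and_eq_true, decide_eq_true_eq, beq_iff_eq] at h
  simp only [PySem.Chars.isspace, PySem.Int.isIntSpace, char_eq_iff_toNat,
    show (' ').toNat = 32 from rfl, show ('\t').toNat = 9 from rfl, show ('\n').toNat = 10 from rfl,
    show ('\x0d').toNat = 13 from rfl, show ('\x0b').toNat = 11 from rfl, show ('\x0c').toNat = 12 from rfl]
  rw [Bool.eq_iff_iff]
  simp only [Bool.or_eq_true, Bool.and_eq_true, decide_eq_true_eq]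
  omega

-- a token that strips to "*" is never parsed by int()
theorem star_not_int (t : List Char) (hd : ∀ c ∈ t, pvDomChar c = true)
    (hs : PySem.Chars.strip t = ['*']) : PySem.Int.ofChars? t = none := by
  have h1 : t.dropWhile PySem.Int.isIntSpace = t.dropWhile PySem.Chars.isspace :=
    (dropWhile_congr' _ _ _ (fun c hc => (isspace_eq_isIntSpace c (hd c hc)).symm))
  have hd2 : ∀ c ∈ (t.dropWhile PySem.Chars.isspace).reverse, pvDomChar c = true := by
    intro c hc
    exact hd c ((List.dropWhile_sublist _).mem (List.mem_reverse.mp hc))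
  have h2 : (t.dropWhile PySem.Chars.isspace).reverse.dropWhile PySem.Int.isIntSpace
      = (t.dropWhile PySem.Chars.isspace).reverse.dropWhile PySem.Chars.isspace :=
    (dropWhile_congr' _ _ _ (fun c hc => (isspace_eq_isIntSpace c (hd2 c hc)).symm))
  have hs' : ((t.dropWhile PySem.Int.isIntSpace).reverse.dropWhile PySem.Int.isIntSpace).reverse = ['*'] := by
    rw [h1, h2]
    simpa [PySem.Chars.strip, PySem.Chars.lstrip, PySem.Chars.rstrip] using hs
  simp only [PySem.Int.ofChars?]
  rw [hs']
  decide

theorem mem_splitOn_go (sep : List Char) (fuel : Nat) :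
    ∀ (l cur : List Char) (acc : List (List Char)) (t : List Char),
      t ∈ PySem.Chars.splitOn.go sep fuel l cur acc → ∀ c ∈ t, c ∈ l ∨ c ∈ cur ∨ ∃ u ∈ acc, c ∈ u := by
  induction fuel with
  | zero =>
    intro l cur acc t ht c hc
    simp only [PySem.Chars.splitOn.go, List.mem_reverse, List.mem_cons] at ht
    rcases ht with h | h
    · subst h; rcases List.mem_append.mp hc with h | h
      · right; left; simpa using h
      · left; exact h
    · right; right; exact ⟨t, h, hc⟩
  | succ n ih =>
    intro l cur acc t ht c hc
    match l with
    | [] =>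
      simp only [PySem.Chars.splitOn.go, List.mem_reverse, List.mem_cons] at ht
      rcases ht with h | h
      · subst h; right; left; simpa using hc
      · right; right; exact ⟨t, h, hc⟩
    | a :: rest =>
      rw [show PySem.Chars.splitOn.go sep (n+1) (a :: rest) cur acc =
          (if sep.isPrefixOf (a :: rest) = true then
            PySem.Chars.splitOn.go sep n (List.drop sep.length (a :: rest)) [] (cur.reverse :: acc)
          else PySem.Chars.splitOn.go sep n rest (a :: cur) acc) from rfl] at ht
      split at ht
      · rcases ih _ _ _ _ ht c hc with h | h | ⟨u, hu, hcu⟩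
        · left; exact (List.drop_sublist _ _).mem h
        · simp at h
        · rcases List.mem_cons.mp hu with h | h
          · right; left; subst h; simpa using hcu
          · right; right; exact ⟨u, h, hcu⟩
      · rcases ih _ _ _ _ ht c hc with h | h | ⟨u, hu, hcu⟩
        · left; exact List.mem_cons_of_mem _ h
        · rcases List.mem_cons.mp h with h | h
          · left; simp [h]
          · right; left; exact h
        · right; right; exact ⟨u, hu, hcu⟩

theorem mem_splitOn_subset (cs sep t : List Char) (ht : t ∈ PySem.Chars.splitOn cs sep) :
    ∀ c ∈ t, c ∈ cs := by
  intro c hc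
  rcases mem_splitOn_go sep (cs.length + 1) cs [] [] t ht c hc with h | h | ⟨u, hu, _⟩
  · exact h
  · simp at h
  · simp at hu

-- A's fold over the token list, computed component-wise
theorem foldA_spec (toks : List String)
    (h : ∀ t ∈ toks, PySem.Str.strip t = "*" → PySem.Int.ofStr? t = none) :
    ∀ (na : List String) (d : Int) (w db : Bool),
    toks.foldl (fun (st : List String × Int × Bool × Bool) arg =>
      match PySem.Int.ofStr? arg with
      | none =>
        if PySem.Str.strip arg = "*" then (st.1, st.2.1, true, st.2.2.2)
        else (st.1 ++ [PySem.Str.strip (PySem.Str.lower arg)], st.2.1, st.2.2.1, st.2.2.2)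
      | some n =>
        if st.2.2.2 = false then (st.1, n, st.2.2.1, true) else st)
      (na, d, w, db) =
    (na ++ (toks.filter (fun t => (pvTryInt t).isNone && !(PySem.Str.strip t == "*"))).map
        (fun t => PySem.Str.strip (PySem.Str.lower t)),
     (if db then d else ((toks.map pvTryInt).findSome? id).getD d),
     w || toks.any (fun t => PySem.Str.strip t == "*"),
     db || toks.any (fun t => (pvTryInt t).isSome)) := by
  induction toks with
  | nil => intro na d w db; simp
  | cons t ts ih =>
    intro na d w db
    have hmem : ∀ u ∈ ts, PySem.Str.strip u = "*" → PySem.Int.ofStr? u = none :=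
      fun u hu => h u (List.mem_cons_of_mem _ hu)
    simp only [List.foldl_cons]
    cases hp : PySem.Int.ofStr? t with
    | none =>
      by_cases hstar : PySem.Str.strip t = "*"
      · simp only [hstar, if_pos rfl]
        rw [ih hmem]
        have hb : (PySem.Str.strip t == "*") = true := beq_iff_eq.mpr hstar
        simp [pvTryInt, hp, hb]
      · have hb : (PySem.Str.strip t == "*") = false := beq_eq_false_iff_ne.mpr hstar
        simp only [if_neg hstar]
        rw [ih hmem]
        simp [pvTryInt, hp, hb]
    | some n =>
      have hstar : ¬ PySem.Str.strip t = "*" := by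
        intro hs
        simp [h t (by simp) hs] at hp
      have hb : (PySem.Str.strip t == "*") = false := beq_eq_false_iff_ne.mpr hstar
      cases db with
      | false =>
        simp only [if_pos rfl]
        rw [ih hmem]
        simp [pvTryInt, hp, hb]
      | true =>
        simp only [if_neg (show ¬(true = false) by decide)]
        rw [ih hmem]
        simp [pvTryInt, hp, hb]

-- ===== VERDICT =====
theorem cleaned_args_spec : Claim_equal_cleaned_args := by
  intro args hdom
  unfold Spec_cleaned_args
  by_cases hempty : args = ""
  · subst hempty; decide
  · have hdomtok : ∀ t ∈ (PySem.Chars.splitOn args.toList ['-']).map String.ofList,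
        PySem.Str.strip t = "*" → PySem.Int.ofStr? t = none := by
      intro t ht hs
      rcases List.mem_map.mp ht with ⟨u, hu, rfl⟩
      have hdu : ∀ c ∈ u, pvDomChar c = true := by
        intro c hc
        have hcargs : c ∈ args.toList := mem_splitOn_subset _ _ _ hu c hc
        have := hdom
        unfold Dom_cleaned_args pvDomStr at this
        exact List.all_eq_true.mp this c hcargs
      have hstrip : PySem.Chars.strip (String.ofList u).toList = ['*'] := by
        have : (PySem.Str.strip (String.ofList u)).toList = ("*" : String).toList := by rw [hs]
        simpa [PySem.Str.strip] using this
      have : PySem.Int.ofChars? (String.ofList u).toList = none := by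
        apply star_not_int _ _ hstrip
        intro c hc
        exact hdu c (by simpa using hc)
      simpa [PySem.Int.ofStr?] using this
    simp only [cleaned_args, cleaned_args_alt, if_neg hempty]
    rw [foldA_spec _ hdomtok]
    simp
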